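-- pv_equiv track=rewrite | github.com/vishalr316/100daysofcode | Leetcode-winning-player.py | losingPlayer
-- ===== SOURCE A (Python) =====
-- def losingPlayer(x: int, y: int) -> str:
--     count = 0
--
--     while (x >= 1) and (y >= 4):
--         count += 1
--         x -= 1
--         y -= 4
--     if (count % 2) != 0:
--         return "Alice"
--     else:
--         return "Bob"
-- ===== SOURCE B (Python) =====
-- def losingPlayer(x: int, y: int) -> str:
--     c = min(x, y // 4)
--     return "Alice" if c > 0 and c % 2 == 1 else "Bob"
-- ===== Notes on version B (the rewrite author's own statement) =====
-- stated objective: faster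
-- what changed: Replaces the subtract-in-a-loop simulation with a closed form: count = min(x, y // 4), answer decided by its sign and parity.
import Mathlib
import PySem

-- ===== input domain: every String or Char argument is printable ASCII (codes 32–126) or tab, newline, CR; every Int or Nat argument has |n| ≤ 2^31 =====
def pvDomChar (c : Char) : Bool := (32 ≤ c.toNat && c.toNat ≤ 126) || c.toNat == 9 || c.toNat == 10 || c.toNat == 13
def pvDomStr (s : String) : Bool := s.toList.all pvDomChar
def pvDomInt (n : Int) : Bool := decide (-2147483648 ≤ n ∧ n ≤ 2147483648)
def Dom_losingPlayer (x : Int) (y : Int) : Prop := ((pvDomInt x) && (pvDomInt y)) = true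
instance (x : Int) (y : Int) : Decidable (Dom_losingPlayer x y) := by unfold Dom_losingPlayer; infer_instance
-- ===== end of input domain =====

-- B replaces A's subtract-in-a-loop simulation by the closed form min(x, y // 4) and a parity check (objective: faster, measured).

-- ===== PORT A =====
-- A's while loop: state (x, y, count); terminates because x strictly decreases while x ≥ 1.
def losingPlayerLoop (x : Int) (y : Int) (count : Int) : Int :=
  if h : x ≥ 1 ∧ y ≥ 4 then losingPlayerLoop (x - 1) (y - 4) (count + 1) else count
termination_by x.toNat
decreasing_by omega

def losingPlayer (x : Int) (y : Int) : String :=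
  let count := losingPlayerLoop x y 0
  if count % 2 ≠ 0 then "Alice" else "Bob"

-- ===== PORT B =====
def losingPlayer_alt (x : Int) (y : Int) : String :=
  let c := min x (PySem.Int.floordiv y 4)
  if c > 0 ∧ c % 2 = 1 then "Alice" else "Bob"

-- ===== PRECONDITION & SPEC =====
def Spec_losingPlayer (x : Int) (y : Int) (out : String) : Prop := out = losingPlayer_alt x y
instance (x : Int) (y : Int) (out : String) : Decidable (Spec_losingPlayer x y out) := by unfold Spec_losingPlayer; infer_instance

-- ===== CLAIM (what is proved, stated in full; the proofs are below) =====
def Claim_equal_losingPlayer : Prop := ∀ (x : Int) (y : Int), Dom_losingPlayer x y → Spec_losingPlayer x y (losingPlayer x y)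

-- ===== LEMMAS AND PROOFS =====
-- The loop adds exactly max 0 (min x (y // 4)) to count.
theorem losingPlayerLoop_closed (x y count : Int) :
    losingPlayerLoop x y count = count + max 0 (min x (PySem.Int.floordiv y 4)) := by
  by_cases h : x ≥ 1 ∧ y ≥ 4
  · rw [losingPlayerLoop, dif_pos h, losingPlayerLoop_closed (x - 1) (y - 4) (count + 1)]
    have h1 : PySem.Int.floordiv (y - 4) 4 = PySem.Int.floordiv y 4 - 1 := by
      rw [PySem.Int.floordiv_eq_iff_of_pos (by omega)]
      have := (PySem.Int.floordiv_eq_iff_of_pos (a := y) (b := 4) (q := PySem.Int.floordiv y 4) (by omega)).mp rfl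
      omega
    have h2 : PySem.Int.floordiv y 4 ≥ 1 := by
      have := (PySem.Int.floordiv_eq_iff_of_pos (a := y) (b := 4) (q := PySem.Int.floordiv y 4) (by omega)).mp rfl
      omega
    rw [h1]; omega
  · rw [losingPlayerLoop, dif_neg h]
    have h2 : ¬ (y ≥ 4) → PySem.Int.floordiv y 4 ≤ 0 := by
      intro hy
      have := (PySem.Int.floordiv_eq_iff_of_pos (a := y) (b := 4) (q := PySem.Int.floordiv y 4) (by omega)).mp rfl
      omega
    rcases not_and_or.mp h with hx | hy
    · omega
    · have := h2 hy; omega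
termination_by x.toNat
decreasing_by omega

-- ===== VERDICT (by name: the statement is the Claim_ definition above) =====
theorem losingPlayer_spec : Claim_equal_losingPlayer := by
  intro x y _
  show losingPlayer x y = losingPlayer_alt x y
  unfold losingPlayer losingPlayer_alt
  rw [losingPlayerLoop_closed]
  set c := min x (PySem.Int.floordiv y 4) with hc
  simp only [zero_add]
  by_cases h : c > 0 ∧ c % 2 = 1
  · rw [if_pos h, if_pos (by omega)]
  · rw [if_neg h, if_neg (by omega)]
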